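-- pv_equiv track=rewrite | github.com/Dwaris/InfoLK | 02 Algorithmen/20180208/geometrischeObjekte.py | xSpiegelnStreckenzug
-- ===== SOURCE A (Python) =====
-- def istPunkt(L):
--     if type(L) == list:
--         if len(L) == 2:
--             if (type(L[0]) == int) and (type(L[1]) == int):
--                 return True
--             else:
--                 return False
--         else:
--             return False
--     else:
--         return False
--
-- def istStreckenzug(L):
--     if type(L) == list:
--         if len(L) == 0:
--             return True
--         else:
--             if istPunkt(L[0]):
--                 return istStreckenzug(L[1:])
--             else:
--                 return False
--     else:
--         return False
--
-- def xSpiegelnPunkt(punkt):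
--     if istPunkt(punkt):
--         return [punkt[0], -1 * punkt[1]]
--
-- def xSpiegelnStreckenzug(streckenzug):
--     if istStreckenzug(streckenzug):
--         if streckenzug == []:
--             return []
--         else:
--             punkt = streckenzug[0]
--             restStreckenzug = streckenzug[1:]
--             return xSpiegelnStreckenzug(restStreckenzug) + [xSpiegelnPunkt(punkt)]
-- ===== SOURCE B (Python) =====
-- def xSpiegelnStreckenzug(streckenzug):
--     if type(streckenzug) != list:
--         return None
--     for p in streckenzug:
--         if not (type(p) == list and len(p) == 2
--                 and type(p[0]) == int and type(p[1]) == int):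
--             return None
--     result = []
--     for p in streckenzug:
--         result = [[p[0], -1 * p[1]]] + result
--     return result
-- ===== Notes on version B (the rewrite author's own statement) =====
-- stated objective: alternative
-- what changed: Replaced the quadratic recursion (slice per element, append at the tail) with one iterative validation pass followed by one accumulator loop that prepends each mirrored point, producing the reversed list directly.
import Mathlib
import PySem

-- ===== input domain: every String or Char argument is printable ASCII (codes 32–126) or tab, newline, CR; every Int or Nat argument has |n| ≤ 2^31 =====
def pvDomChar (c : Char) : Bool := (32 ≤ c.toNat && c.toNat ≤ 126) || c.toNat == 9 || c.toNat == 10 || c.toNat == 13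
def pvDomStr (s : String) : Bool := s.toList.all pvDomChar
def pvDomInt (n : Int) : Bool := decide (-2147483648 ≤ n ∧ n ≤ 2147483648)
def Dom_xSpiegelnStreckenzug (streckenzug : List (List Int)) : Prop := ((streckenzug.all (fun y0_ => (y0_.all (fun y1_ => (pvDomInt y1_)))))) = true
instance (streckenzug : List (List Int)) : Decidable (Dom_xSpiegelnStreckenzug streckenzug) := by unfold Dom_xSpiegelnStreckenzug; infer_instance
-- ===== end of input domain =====

-- B replaces A's quadratic tail-appending recursion by a single validation pass plus one
-- accumulator loop that prepends each mirrored point (objective: alternative decomposition).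

-- ===== PORT A =====
-- under the type convention the arguments are lists of 2-int lists, so the Python
-- type(...)-checks reduce to the length check
def istPunkt (L : List Int) : Bool :=
  if L.length == 2 then true else false

def istStreckenzug : List (List Int) → Bool
  | [] => true
  | p :: rest => if istPunkt p then istStreckenzug rest else false

def xSpiegelnPunkt (punkt : List Int) : Option (List Int) :=
  if istPunkt punkt then
    match PySem.List.pyGet? punkt 0, PySem.List.pyGet? punkt 1 with
    | some a, some b => some [a, -1 * b]
    | _, _ => none
  else none

def xSpiegelnStreckenzug (streckenzug : List (List Int)) : Option (List (List Int)) :=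
  if istStreckenzug streckenzug then
    match streckenzug with
    | [] => some []
    | punkt :: restStreckenzug =>
      match xSpiegelnStreckenzug restStreckenzug, xSpiegelnPunkt punkt with
      | some l, some q => some (l ++ [q])
      | _, _ => none
  else none

-- ===== PORT B =====
-- validation for-loop with early `return None` ≙ List.all; then the accumulator loop
-- `result = [mirror p] + result` ≙ foldl with prepend (indices 0,1 are valid after validation)
def xSpiegelnStreckenzug_alt (streckenzug : List (List Int)) : Option (List (List Int)) :=
  if streckenzug.all (fun p => p.length == 2) then
    some (streckenzug.foldl (fun result p => [p.getD 0 0, -1 * p.getD 1 0] :: result) [])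
  else none

-- ===== PRECONDITION & SPEC =====
def Spec_xSpiegelnStreckenzug (streckenzug : List (List Int)) (out : Option (List (List Int))) : Prop := out = xSpiegelnStreckenzug_alt streckenzug
instance (streckenzug : List (List Int)) (out : Option (List (List Int))) : Decidable (Spec_xSpiegelnStreckenzug streckenzug out) := by unfold Spec_xSpiegelnStreckenzug; infer_instance

-- ===== CLAIM (what is proved, stated in full; the proofs are below) =====
def Claim_equal_xSpiegelnStreckenzug : Prop := ∀ (streckenzug : List (List Int)), Dom_xSpiegelnStreckenzug streckenzug → Spec_xSpiegelnStreckenzug streckenzug (xSpiegelnStreckenzug streckenzug)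

-- ===== LEMMAS AND PROOFS =====
def pvMirror (p : List Int) : List Int := [p.getD 0 0, -1 * p.getD 1 0]

lemma istStreckenzug_eq_all (s : List (List Int)) :
    istStreckenzug s = s.all (fun p => p.length == 2) := by
  induction s with
  | nil => rfl
  | cons p r ih =>
      simp only [istStreckenzug, istPunkt, List.all_cons]
      by_cases h : p.length = 2 <;> simp [h, ih]

lemma xSpiegelnPunkt_of_len2 (p : List Int) (h : p.length = 2) :
    xSpiegelnPunkt p = some (pvMirror p) := by
  match p, h with
  | [a, b], _ =>
      simp [xSpiegelnPunkt, istPunkt, pvMirror, PySem.List.pyGet?, PySem.List.pyIdx?]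

lemma xSpiegeln_valid (s : List (List Int))
    (h : s.all (fun p => p.length = 2)) :
    xSpiegelnStreckenzug s = some ((s.map pvMirror).reverse) := by
  induction s with
  | nil => rfl
  | cons p r ih =>
      simp only [List.all_cons, Bool.and_eq_true, decide_eq_true_eq] at h
      rw [xSpiegelnStreckenzug]
      have hval : istStreckenzug (p :: r) = true := by
        rw [istStreckenzug_eq_all]; simp [h.1]; simpa using h.2
      rw [hval]
      simp only [if_true]
      rw [ih (by simpa using h.2), xSpiegelnPunkt_of_len2 p h.1]
      simp

lemma foldl_prepend (s : List (List Int)) (acc : List (List Int)) :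
    s.foldl (fun result p => pvMirror p :: result) acc
      = (s.map pvMirror).reverse ++ acc := by
  induction s generalizing acc with
  | nil => simp
  | cons p r ih => simp [List.foldl_cons, ih]

-- ===== VERDICT (by name: the statement is the Claim_ definition above) =====
theorem xSpiegelnStreckenzug_spec : Claim_equal_xSpiegelnStreckenzug := by
  intro s _
  unfold Spec_xSpiegelnStreckenzug xSpiegelnStreckenzug_alt
  by_cases h : s.all (fun p => p.length = 2)
  · have h' : s.all (fun p => p.length == 2) = true := by simpa using h
    rw [if_pos h', xSpiegeln_valid s (by simpa using h)]
    have := foldl_prepend s []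
    simp only [pvMirror] at this ⊢
    rw [this]; simp
  · have h' : s.all (fun p => p.length == 2) = false := by
      simpa using h
    rw [if_neg (by simp [h'])]
    rw [xSpiegelnStreckenzug.eq_def]
    rw [istStreckenzug_eq_all, h']
    rfl
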